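/- GENERATED by farm/mkstatement.py from design/units.tsv (unit `point_compare`) and the Specs of Vorbis/Spec/*.lean — do not edit.
   THE STATEMENT of the proof unit `point_compare`: the function `point_compare` (21 instructions) satisfies its contract,
   given the contracts of its callees. What the names mean: Vorbis/Spec/Basic.lean. The theorem to prove:
   `theorem point_compare_ok : Vorbis.Spec.point_compare.Statement`. -/
import Vorbis.Spec.Leaves2
namespace Vorbis.Spec.point_compare
open X86 X86.User Asan

/-- The statement of unit `point_compare`. -/
def Statement : Prop :=
  ∀ (Lay : Layout) (_hLay : Lay.hi = 0x1000000) (μ : Microarch) (_hμ : UserX.MicroOK μ) (u₀ : State)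
    (_hcode : HasCodeNat Lay u₀ Vorbis.L.point_compare.entry Vorbis.Code.code_point_compare.nat Vorbis.L.point_compare.size)
    (_h_asan_load2_noabort : Asan.SmallCheck Lay μ Vorbis.WayInv (Vorbis.CodeOK u₀) [.rax, .rcx, .rdx] 2 Vorbis.L.__asan_load2_noabort.entry),
    ∀ (others : List Obj) (frames : List (Nat × FrameLayout)), Calls Lay μ Vorbis.WayInv (Vorbis.conv u₀) Vorbis.L.point_compare.entry (Vorbis.Spec.point_compare.spec others frames)

end Vorbis.Spec.point_compare
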